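-- pv_equiv track=rewrite | github.com/AIperture/aethergraph-examples | pattern_examples/2_agent_patterns/2_simple_react.py | parse_react_output
-- ===== SOURCE A (Python) =====
-- from typing import Any, Dict, List, Tuple
--
-- def parse_react_output(text: str) -> Tuple[str, str, str]:
--     """
--     Parse a simple ReAct-style output into (thought, action, action_input).
--
--     We expect the model to respond with lines like:
--
--         Thought: I should look up AetherGraph.
--         Action: Search
--         Action Input: aethergraph
--
--     or to finish:
--
--         Thought: I now know the answer.
--         Action: Finish
--         Action Input: AetherGraph is ...
--
--     This is intentionally naive and text-based; in a real system, you
--     might ask the model to output structured JSON instead.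
--     """
--     thought = ""
--     action = ""
--     action_input = ""
--
--     for line in text.splitlines():
--         line = line.strip()
--         if line.startswith("Thought:"):
--             thought = line[len("Thought:"):].strip()
--         elif line.startswith("Action:"):
--             action = line[len("Action:"):].strip()
--         elif line.startswith("Action Input:"):
--             action_input = line[len("Action Input:"):].strip()
--
--     return thought, action, action_input
-- ===== SOURCE B (Python) =====
-- def parse_react_output(text):
--     """Collect the stripped remainder of the last line carrying each prefix,
--     in three independent filtered scans (prefixes are mutually exclusive)."""
--     def last_value(prefix):
--         val = ""
--         for line in text.splitlines():
--             line = line.strip()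
--             if line.startswith(prefix):
--                 val = line[len(prefix):].strip()
--         return val
--     return (last_value("Thought:"), last_value("Action:"), last_value("Action Input:"))
-- ===== Notes on version B (the rewrite author's own statement) =====
-- stated objective: simpler
-- what changed: Replaces the single pass with a triple elif-updated accumulator by one generic helper (last stripped remainder of a line with a given prefix) called three times, one independent scan per field.
import Mathlib
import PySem

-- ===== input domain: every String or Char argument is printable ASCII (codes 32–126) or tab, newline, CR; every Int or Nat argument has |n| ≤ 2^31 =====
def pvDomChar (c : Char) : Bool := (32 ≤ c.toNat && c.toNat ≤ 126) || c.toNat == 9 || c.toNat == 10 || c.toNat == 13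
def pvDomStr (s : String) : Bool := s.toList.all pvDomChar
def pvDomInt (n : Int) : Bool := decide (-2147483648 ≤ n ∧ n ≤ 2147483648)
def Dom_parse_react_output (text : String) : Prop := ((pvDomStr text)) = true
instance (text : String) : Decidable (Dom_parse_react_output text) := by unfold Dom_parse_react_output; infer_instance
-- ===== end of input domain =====

-- B replaces A's single pass with a triple elif-updated accumulator by a generic
-- "last stripped remainder of a line with this prefix" helper called three times (objective: simpler).

-- ===== PORT A =====
-- loop body of A's single for-loop (elif chain over the stripped line, triple state)
def pvStepA (st : String × String × String) (line : String) : String × String × String :=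
  let l := PySem.Str.strip line
  if PySem.Str.startswith l "Thought:" then
    (PySem.Str.strip (PySem.Str.slice l (some 8) none), st.2.1, st.2.2)
  else if PySem.Str.startswith l "Action:" then
    (st.1, PySem.Str.strip (PySem.Str.slice l (some 7) none), st.2.2)
  else if PySem.Str.startswith l "Action Input:" then
    (st.1, st.2.1, PySem.Str.strip (PySem.Str.slice l (some 13) none))
  else st

def parse_react_output (text : String) : String × String × String :=
  (PySem.Str.splitlines text).foldl pvStepA ("", "", "")

-- ===== PORT B =====
-- Source B's helper: stripped remainder of the last stripped line starting with `pre`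
def pvLastValue (text : String) (pre : String) : String :=
  (PySem.Str.splitlines text).foldl
    (fun val line =>
      let l := PySem.Str.strip line
      if PySem.Str.startswith l pre then
        PySem.Str.strip (PySem.Str.slice l (some (PySem.Str.len pre : Int)) none)
      else val) ""

def parse_react_output_alt (text : String) : String × String × String :=
  (pvLastValue text "Thought:", pvLastValue text "Action:", pvLastValue text "Action Input:")

-- ===== PRECONDITION & SPEC =====
def Spec_parse_react_output (text : String) (out : String × String × String) : Prop := out = parse_react_output_alt text
instance (text : String) (out : String × String × String) : Decidable (Spec_parse_react_output text out) := by unfold Spec_parse_react_output; infer_instance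

-- ===== CLAIM (what is proved, stated in full; the proofs are below) =====
def Claim_equal_parse_react_output : Prop := ∀ (text : String), Dom_parse_react_output text → Spec_parse_react_output text (parse_react_output text)

-- ===== LEMMAS AND PROOFS =====

-- the three prefixes are mutually exclusive on any one line
theorem pv_sw_thought_not_action (s : List Char)
    (h : PySem.Chars.startswith s ['T', 'h', 'o', 'u', 'g', 'h', 't', ':'] = true) :
    PySem.Chars.startswith s ['A', 'c', 't', 'i', 'o', 'n', ':'] = false := by
  rw [PySem.Chars.startswith_iff] at h
  obtain ⟨t, ht⟩ := h
  rw [← ht]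
  simp [PySem.Chars.startswith, List.isPrefixOf]

theorem pv_sw_thought_not_actioninput (s : List Char)
    (h : PySem.Chars.startswith s ['T', 'h', 'o', 'u', 'g', 'h', 't', ':'] = true) :
    PySem.Chars.startswith s ['A', 'c', 't', 'i', 'o', 'n', ' ', 'I', 'n', 'p', 'u', 't', ':'] = false := by
  rw [PySem.Chars.startswith_iff] at h
  obtain ⟨t, ht⟩ := h
  rw [← ht]
  simp [PySem.Chars.startswith, List.isPrefixOf]

theorem pv_sw_action_not_actioninput (s : List Char)
    (h : PySem.Chars.startswith s ['A', 'c', 't', 'i', 'o', 'n', ':'] = true) :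
    PySem.Chars.startswith s ['A', 'c', 't', 'i', 'o', 'n', ' ', 'I', 'n', 'p', 'u', 't', ':'] = false := by
  rw [PySem.Chars.startswith_iff] at h
  obtain ⟨t, ht⟩ := h
  rw [← ht]
  simp [PySem.Chars.startswith, List.isPrefixOf]

-- B's per-field loop bodies
def pvF1 (val line : String) : String :=
  let l := PySem.Str.strip line
  if PySem.Str.startswith l "Thought:" then PySem.Str.strip (PySem.Str.slice l (some 8) none) else val
def pvF2 (val line : String) : String :=
  let l := PySem.Str.strip line
  if PySem.Str.startswith l "Action:" then PySem.Str.strip (PySem.Str.slice l (some 7) none) else val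
def pvF3 (val line : String) : String :=
  let l := PySem.Str.strip line
  if PySem.Str.startswith l "Action Input:" then PySem.Str.strip (PySem.Str.slice l (some 13) none) else val

-- one line: A's elif-step equals the three independent updates
theorem pv_step_eq (st : String × String × String) (line : String) :
    pvStepA st line = (pvF1 st.1 line, pvF2 st.2.1 line, pvF3 st.2.2 line) := by
  unfold pvStepA pvF1 pvF2 pvF3
  simp only [PySem.Str.startswith_eq, PySem.Str.toList_strip]
  set L := PySem.Chars.strip line.toList
  by_cases h1 : PySem.Chars.startswith L ['T', 'h', 'o', 'u', 'g', 'h', 't', ':'] = true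
  · simp [h1, pv_sw_thought_not_action L h1, pv_sw_thought_not_actioninput L h1]
  · by_cases h2 : PySem.Chars.startswith L ['A', 'c', 't', 'i', 'o', 'n', ':'] = true
    · simp [h1, h2, pv_sw_action_not_actioninput L h2]
    · by_cases h3 : PySem.Chars.startswith L ['A', 'c', 't', 'i', 'o', 'n', ' ', 'I', 'n', 'p', 'u', 't', ':'] = true
      · simp [h1, h2, h3]
      · simp [h1, h2, h3]

-- the whole fold splits componentwise
theorem pv_fold_eq (lines : List String) (t a i : String) :
    lines.foldl pvStepA (t, a, i) =
      (lines.foldl pvF1 t, lines.foldl pvF2 a, lines.foldl pvF3 i) := by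
  induction lines generalizing t a i with
  | nil => rfl
  | cons x xs ih =>
      simp only [List.foldl_cons]
      rw [pv_step_eq (t, a, i) x]
      exact ih _ _ _

theorem pv_lastValue_eq (text : String) :
    pvLastValue text "Thought:" = (PySem.Str.splitlines text).foldl pvF1 "" ∧
    pvLastValue text "Action:" = (PySem.Str.splitlines text).foldl pvF2 "" ∧
    pvLastValue text "Action Input:" = (PySem.Str.splitlines text).foldl pvF3 "" := by
  exact ⟨rfl, rfl, rfl⟩

-- ===== VERDICT (by name: the statement is the Claim_ definition above) =====
theorem parse_react_output_spec : Claim_equal_parse_react_output := by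
  intro text _
  unfold Spec_parse_react_output parse_react_output parse_react_output_alt
  obtain ⟨e1, e2, e3⟩ := pv_lastValue_eq text
  rw [e1, e2, e3, pv_fold_eq]
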